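-- pv_equiv track=rewrite | github.com/BBT-AlgorithmsWorkGroup/FirstChallange | que1/23s/1.py | wRace
-- ===== SOURCE A (Python) =====
-- def wRace(words):
--
--     words = words.split()
--     score = []
--
--     for i in words:
--         wTotal = 0
--
--         for n in i.lower():
--             wTotal = wTotal + (ord(n)-96)
--         score = score + [wTotal]
--
--     return words[score.index(max(score))]
-- ===== SOURCE B (Python) =====
-- def wRace(words):
--     def score(w):
--         return sum(ord(c) - 96 for c in w.lower())
--     return sorted(words.split(), key=score, reverse=True)[0]
-- ===== Notes on version B (the rewrite author's own statement) =====
-- stated objective: alternative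
-- what changed: Replaces the parallel score list plus score.index(max(score)) rescan with a stable descending sort by letter-sum key and taking the first element; stability of sorted(..., reverse=True) preserves A's first-word tie-breaking.
import Mathlib
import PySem

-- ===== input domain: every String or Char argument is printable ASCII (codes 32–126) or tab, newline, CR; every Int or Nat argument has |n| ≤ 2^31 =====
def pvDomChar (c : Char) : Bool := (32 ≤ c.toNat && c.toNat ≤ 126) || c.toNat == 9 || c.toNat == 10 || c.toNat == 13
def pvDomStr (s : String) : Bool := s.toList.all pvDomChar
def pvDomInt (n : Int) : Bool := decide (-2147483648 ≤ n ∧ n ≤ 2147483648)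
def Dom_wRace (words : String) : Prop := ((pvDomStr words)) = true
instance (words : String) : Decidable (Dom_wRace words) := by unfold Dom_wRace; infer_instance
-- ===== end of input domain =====

-- B replaces A's score table + score.index(max(score)) rescan by a stable descending sort on the
-- letter-sum key, returning the sorted list's first element (objective: alternative; not faster).

-- ===== PORT A =====
-- inner loop: for n in i.lower(): wTotal = wTotal + (ord(n)-96)
def wRaceScore (i : String) : Int :=
  (PySem.Str.lower i).toList.foldl (fun wTotal n => wTotal + ((n.toNat : Int) - 96)) 0

def wRace (words : String) : String :=
  let ws := PySem.Str.split₀ words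
  let score : List Int := ws.foldl (fun score i => score ++ [wRaceScore i]) []
  match PySem.List.max? score (fun x => x) with
  | none => ""  -- Python: max([]) raises ValueError; excluded by Pre_wRace
  | some m =>
    match PySem.List.index? score m with
    | none => ""
    | some k => (PySem.List.pyGet? ws (k : Int)).getD ""

-- ===== PORT B =====
-- key: score(w) = sum(ord(c) - 96 for c in w.lower())
def wRaceKey (w : String) : Int :=
  ((PySem.Str.lower w).toList.map (fun c => (c.toNat : Int) - 96)).sum

-- sorted(words.split(), key=score, reverse=True)[0]
def wRace_alt (words : String) : String :=
  match PySem.List.sorted (PySem.Str.split₀ words) wRaceKey true with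
  | [] => ""  -- Python: [0] on the empty list raises IndexError; excluded by Pre_wRace
  | w :: _ => w

-- ===== PRECONDITION & SPEC =====
-- A raises ValueError from max([]) (and B IndexError from [0]) exactly when words.split() is empty.
def Pre_wRace (words : String) : Prop := PySem.Str.split₀ words ≠ []
instance (words : String) : Decidable (Pre_wRace words) := by unfold Pre_wRace; infer_instance

def pvWitness_wRace : String := "abc zz"

def Spec_wRace (words : String) (out : String) : Prop := out = wRace_alt words
instance (words : String) (out : String) : Decidable (Spec_wRace words out) := by unfold Spec_wRace; infer_instance

-- ===== CLAIM (what is proved, stated in full; the proofs are below) =====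
def Claim_equal_wRace : Prop := ∀ (words : String), Dom_wRace words → Pre_wRace words → Spec_wRace words (wRace words)

-- ===== LEMMAS AND PROOFS =====

-- A's running sum equals B's key (sum of the mapped letter values).
theorem wRaceScore_eq_key (w : String) : wRaceScore w = wRaceKey w := by
  unfold wRaceScore wRaceKey
  induction (PySem.Str.lower w).toList using List.reverseRecOn with
  | nil => simp
  | append_singleton l c ih => simp [ih]

-- the running first-max over a list, seeded with m
def wrBest {α : Type} (key : α → Int) (m : α) (t : List α) : α :=
  t.foldl (fun m x => if key m < key x then x else m) m

theorem max?_cons_eq_wrBest {α : Type} (key : α → Int) (x : α) (t : List α) :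
    PySem.List.max? (x :: t) key = some (wrBest key x t) := by
  unfold PySem.List.max? wrBest
  induction t generalizing x with
  | nil => rfl
  | cons y t ih => simp only [List.foldl]; split <;> exact ih _

-- the first max splits the list: strictly smaller keys before it, ≤ keys after it
theorem wrBest_split {α : Type} (key : α → Int) :
    ∀ (t : List α) (m : α), ∃ pre suf, m :: t = pre ++ wrBest key m t :: suf ∧
      (∀ y ∈ pre, key y < key (wrBest key m t)) ∧
      (∀ y ∈ suf, key y ≤ key (wrBest key m t)) := by
  intro t
  induction t with
  | nil => intro m; exact ⟨[], [], by simp [wrBest], by simp, by simp⟩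
  | cons x t ih =>
    intro m
    by_cases h : key m < key x
    · have hb : wrBest key m (x :: t) = wrBest key x t := by simp [wrBest, h]
      rw [hb]
      obtain ⟨pre, suf, heq, hpre, hsuf⟩ := ih x
      have hxle : key x ≤ key (wrBest key x t) :=
        PySem.List.max?_isMax (max?_cons_eq_wrBest key x t) x (by simp)
      refine ⟨m :: pre, suf, ?_, ?_, hsuf⟩
      · rw [List.cons_append, ← heq]
      · intro y hy
        rcases List.mem_cons.mp hy with rfl | hy
        · exact lt_of_lt_of_le h hxle
        · exact hpre y hy
    · have hb : wrBest key m (x :: t) = wrBest key m t := by simp [wrBest, h]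
      rw [hb]
      obtain ⟨pre, suf, heq, hpre, hsuf⟩ := ih m
      cases pre with
      | nil =>
        simp only [List.nil_append] at heq
        have hm : m = wrBest key m t := by
          have := congrArg List.head? heq; simpa using this
        have ht : t = suf := by
          have := congrArg List.tail heq; simpa using this
        refine ⟨[], x :: suf, ?_, by simp, ?_⟩
        · rw [← hm, ht]; rfl
        · intro y hy
          rcases List.mem_cons.mp hy with rfl | hy
          · rw [← hm]; exact le_of_not_gt h
          · exact hsuf y hy
      | cons p ps =>
        have hp : m = p := by
          have := congrArg List.head? heq; simpa using this
        have ht : t = ps ++ wrBest key m t :: suf := by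
          have := congrArg List.tail heq; simpa using this
        have hmlt : key m < key (wrBest key m t) := by
          have := hpre p (by simp); rwa [← hp] at this
        refine ⟨m :: x :: ps, suf, ?_, ?_, hsuf⟩
        · simp only [List.cons_append]; conv_lhs => rw [ht]
        · intro y hy
          rcases List.mem_cons.mp hy with rfl | hy
          · exact hmlt
          rcases List.mem_cons.mp hy with rfl | hy
          · exact lt_of_le_of_lt (le_of_not_gt h) hmlt
          · exact hpre y (List.mem_cons_of_mem p hy)

-- A's score list is the map of the key over the words.
theorem score_eq_map (ws : List String) :
    ws.foldl (fun score i => score ++ [wRaceScore i]) [] = ws.map wRaceKey := by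
  rw [PySem.List.foldl_append_singleton_eq_map]
  exact List.map_congr_left (fun i _ => wRaceScore_eq_key i)

-- head of one reverse-order insertion step: the stricter candidate wins, ties keep the old head
theorem head?_insertBy_rev {α : Type} (key : α → Int) (x h : α) (t : List α) :
    (PySem.List.insertBy (fun a b => decide (key b < key a)) x (h :: t)).head? =
      some (if key h < key x then x else h) := by
  simp only [PySem.List.insertBy]
  split_ifs with hc <;> simp_all

-- head of the reverse insertion-sort fold is the running first-max of the remaining elements
theorem head?_foldl_insertBy_rev {α : Type} (key : α → Int) :
    ∀ (l : List α) (acc : List α) (h : α), acc.head? = some h →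
      (l.foldl (fun acc x => PySem.List.insertBy (fun a b => decide (key b < key a)) x acc)
        acc).head? = some (wrBest key h l) := by
  intro l
  induction l with
  | nil => intro acc h hh; simpa [wrBest] using hh
  | cons x l ih =>
    intro acc h hh
    cases acc with
    | nil => simp at hh
    | cons a t =>
      have ha : a = h := by simpa using hh
      simp only [List.foldl]
      have hstep := head?_insertBy_rev key x a t
      have := ih (PySem.List.insertBy (fun a b => decide (key b < key a)) x (a :: t))
        (if key a < key x then x else a) hstep
      rw [this, ha]
      simp [wrBest]

-- B's sorted head IS the running first-max
theorem sorted_rev_head (x : String) (t : List String) :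
    (PySem.List.sorted (x :: t) wRaceKey true).head? = some (wrBest wRaceKey x t) := by
  rw [PySem.List.sorted_rev_eq_foldl_insertBy]
  simp only [List.foldl]
  exact head?_foldl_insertBy_rev wRaceKey t
    (PySem.List.insertBy (fun a b => decide (wRaceKey b < wRaceKey a)) x []) x (by
      simp [PySem.List.insertBy])

-- ===== VERDICT (by name: the statement is the Claim_ definition above) =====
theorem wRace_spec : Claim_equal_wRace := by
  intro words _ hpre
  unfold Spec_wRace wRace wRace_alt
  cases hws : PySem.Str.split₀ words with
  | nil => exact absurd hws hpre
  | cons x t =>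
    obtain ⟨pre, suf, heq, hpre_lt, hsuf_le⟩ := wrBest_split wRaceKey t x
    set w := wrBest wRaceKey x t with hw
    -- B side: head of the descending stable sort is w
    have hB : (match PySem.List.sorted (x :: t) wRaceKey true with
        | [] => "" | w :: _ => w) = w := by
      have := sorted_rev_head x t
      cases hs : PySem.List.sorted (x :: t) wRaceKey true with
      | nil => rw [hs] at this; simp at this
      | cons b bs =>
        rw [hs] at this
        rw [hw]
        simpa using this
    -- A side
    simp only [score_eq_map]
    have hscore : (x :: t).map wRaceKey = pre.map wRaceKey ++ wRaceKey w :: suf.map wRaceKey := by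
      rw [heq]; simp
    have hmv : PySem.List.max? ((x :: t).map wRaceKey) (fun y => y) = some (wRaceKey w) := by
      cases hm : PySem.List.max? ((x :: t).map wRaceKey) (fun y => y) with
      | none =>
        rw [PySem.List.max?_eq_none_iff] at hm
        simp [hscore] at hm
      | some v =>
        have hv1 : v ≤ wRaceKey w := by
          have hmem := PySem.List.max?_mem hm
          rw [hscore] at hmem
          rcases List.mem_append.mp hmem with hl | hr
          · obtain ⟨y, hy, rfl⟩ := List.mem_map.mp hl
            exact le_of_lt (hpre_lt y hy)
          · rcases List.mem_cons.mp hr with rfl | hr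
            · exact le_refl _
            · obtain ⟨y, hy, rfl⟩ := List.mem_map.mp hr
              exact hsuf_le y hy
        have hv2 : wRaceKey w ≤ v :=
          PySem.List.max?_isMax hm (wRaceKey w) (by rw [hscore]; simp)
        congr 1; omega
    rw [hmv]
    have hidx : PySem.List.index? ((x :: t).map wRaceKey) (wRaceKey w) = some pre.length := by
      rw [PySem.List.index?_eq_some_iff]
      refine ⟨pre.map wRaceKey, suf.map wRaceKey, hscore, by simp, ?_⟩
      intro hc
      obtain ⟨y, hy, hyk⟩ := List.mem_map.mp hc
      exact absurd hyk (ne_of_lt (hpre_lt y hy))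
    have hget : PySem.List.pyGet? (x :: t) ((pre.length : Nat) : Int) = some w := by
      rw [PySem.List.pyGet?_natCast, heq]
      simp
    simp only [hidx, hget, Option.getD_some, hB]
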